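-- pv_equiv track=rewrite | github.com/HVP1998/python_learning | experimential/SOHDAS_x2U.py | x2U
-- ===== SOURCE A (Python) =====
-- def x2U(equ:str)->str:
--     res=list()
--     for i in range(0,len(equ)):
--         if(equ[i]=='U'):
--             res.append(equ[i])
--             res.append('.')
--         elif(equ[i]=="."):
--             pass
--         else:
--             res.append(equ[i])
--     return "".join(res)
-- ===== SOURCE B (Python) =====
-- def x2U(equ: str) -> str:
--     return equ.replace('.', '').replace('U', 'U.')
-- ===== Notes on version B (the rewrite author's own statement) =====
-- stated objective: idiomatic
-- what changed: Replaces the explicit index loop with per-character branching and list accumulation by two sequential str.replace passes: first strip all dots, then expand each 'U' into 'U' followed by a dot.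
import Mathlib
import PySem

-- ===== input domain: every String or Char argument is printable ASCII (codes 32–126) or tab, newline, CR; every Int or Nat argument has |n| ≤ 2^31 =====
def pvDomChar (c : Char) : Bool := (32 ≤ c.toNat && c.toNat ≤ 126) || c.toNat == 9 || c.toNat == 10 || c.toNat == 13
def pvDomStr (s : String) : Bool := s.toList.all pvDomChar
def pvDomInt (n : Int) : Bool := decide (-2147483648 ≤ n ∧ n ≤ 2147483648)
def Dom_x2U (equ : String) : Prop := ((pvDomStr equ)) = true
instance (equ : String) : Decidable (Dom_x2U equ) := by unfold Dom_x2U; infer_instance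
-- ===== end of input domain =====

-- B replaces A's index loop with two sequential str.replace passes (drop dots, then expand 'U' to 'U.'); objective: idiomatic.

-- ===== PORT A =====
-- literal port: loop over range(0, len(equ)), index with pyGet? (always in range), append to res, join
def x2U (equ : String) : String :=
  String.ofList ((PySem.List.pyRange 0 (PySem.List.len equ.toList) 1).foldl (fun res i =>
    match PySem.List.pyGet? equ.toList i with
    | some c =>
      if c = 'U' then (res ++ [c]) ++ ['.']
      else if c = '.' then res
      else res ++ [c]
    | none => res) ([] : List Char))

-- ===== PORT B =====
def x2U_alt (equ : String) : String :=
  PySem.Str.replace (PySem.Str.replace equ "." "") "U" "U."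

-- ===== PRECONDITION & SPEC =====
def Spec_x2U (equ : String) (out : String) : Prop := out = x2U_alt equ
instance (equ : String) (out : String) : Decidable (Spec_x2U equ out) := by unfold Spec_x2U; infer_instance

-- ===== CLAIM (what is proved, stated in full; the proofs are below) =====
def Claim_equal_x2U : Prop := ∀ (equ : String), Dom_x2U equ → Spec_x2U equ (x2U equ)

-- ===== LEMMAS AND PROOFS =====

-- per-character expansion A performs
def pvStep (c : Char) : List Char :=
  if c = 'U' then [c, '.'] else if c = '.' then [] else [c]

-- A's loop is the flatMap of pvStep
theorem x2U_eq_flatMap (equ : String) :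
    x2U equ = String.ofList (equ.toList.flatMap pvStep) := by
  unfold x2U
  have hcong :
      (PySem.List.pyRange 0 (PySem.List.len equ.toList) 1).foldl (fun res i =>
        match PySem.List.pyGet? equ.toList i with
        | some c =>
          if c = 'U' then (res ++ [c]) ++ ['.']
          else if c = '.' then res
          else res ++ [c]
        | none => res) ([] : List Char)
      = (PySem.List.pyRange 0 (PySem.List.len equ.toList) 1).foldl (fun res i =>
          res ++ pvStep (PySem.List.pyGetD equ.toList i ' ')) ([] : List Char) := by
    apply PySem.List.foldl_congr_mem
    intro acc i hi
    have hmem := (PySem.List.mem_pyRange_one.mp hi)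
    have h0 : 0 ≤ i := hmem.1
    have hlt : i < PySem.List.len equ.toList := hmem.2
    obtain ⟨k, rfl⟩ := Int.eq_ofNat_of_zero_le h0
    have hk : k < equ.toList.length := by
      simpa [PySem.List.len] using hlt
    have hget : PySem.List.pyGet? equ.toList (k : Int) = some equ.toList[k] := by
      simp [PySem.List.pyGet?_natCast]
    have hgetD : PySem.List.pyGetD equ.toList (k : Int) ' ' = equ.toList[k] := by
      simp [PySem.List.pyGetD_natCast, List.getD_eq_getElem?_getD, List.getElem?_eq_getElem hk]
    rw [hget, hgetD]
    unfold pvStep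
    by_cases h2 : equ.toList[k] = 'U' <;> by_cases h3 : equ.toList[k] = '.' <;>
      simp [h2, h3]
  rw [hcong, PySem.List.foldl_pyRange_zero_pyGetD equ.toList ' '
        (fun res c => res ++ pvStep c) []]
  rw [PySem.List.foldl_append_eq_flatMap]
  simp

-- replace.go with a single-character pattern is a flatMap, given enough fuel
theorem go_single (o : Char) (new : List Char) :
    ∀ (l acc : List Char) (fuel : Nat), l.length ≤ fuel →
      PySem.Chars.replace.go [o] new fuel l acc
        = acc.reverse ++ l.flatMap (fun c => if c = o then new else [c]) := by
  intro l
  induction l with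
  | nil =>
    intro acc fuel _
    cases fuel <;> simp [PySem.Chars.replace.go]
  | cons c t ih =>
    intro acc fuel hf
    cases fuel with
    | zero => simp at hf
    | succ n =>
      have hn : t.length ≤ n := by simpa using hf
      by_cases hc : c = o
      · subst hc
        have : [c].isPrefixOf (c :: t) = true := by simp [List.isPrefixOf]
        simp only [PySem.Chars.replace.go, this, if_true, List.length_cons,
          List.length_nil, List.drop_succ_cons, List.drop_zero]
        rw [ih (new.reverse ++ acc) n hn]
        simp
      · have hpre : [o].isPrefixOf (c :: t) = false := by
          simp [List.isPrefixOf]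
          exact fun h => (hc h.symm).elim
        simp only [PySem.Chars.replace.go, hpre]
        rw [ih _ n hn]
        simp [hc]

theorem replace_single (s : List Char) (o : Char) (new : List Char) :
    PySem.Chars.replace s [o] new
      = s.flatMap (fun c => if c = o then new else [c]) := by
  unfold PySem.Chars.replace
  rw [if_neg (by simp)]
  simpa using go_single o new s [] s.length (le_refl _)

theorem flatMap_compose (cs : List Char) :
    (cs.flatMap (fun c => if c = '.' then ([] : List Char) else [c])).flatMap
        (fun c => if c = 'U' then ['U', '.'] else [c])
      = cs.flatMap pvStep := by
  induction cs with
  | nil => rfl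
  | cons c t ih =>
    by_cases h1 : c = '.' <;> by_cases h2 : c = 'U' <;>
      simp_all [pvStep]

-- ===== VERDICT (by name: the statement is the Claim_ definition above) =====
theorem x2U_spec : Claim_equal_x2U := by
  intro equ _
  unfold Spec_x2U x2U_alt
  rw [x2U_eq_flatMap]
  unfold PySem.Str.replace
  have h1 : ("." : String).toList = ['.'] := rfl
  have h2 : ("" : String).toList = [] := rfl
  have h3 : ("U" : String).toList = ['U'] := rfl
  have h4 : ("U." : String).toList = ['U', '.'] := rfl
  rw [h1, h2, h3, h4, replace_single]
  simp only [String.toList_ofList]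
  rw [replace_single, flatMap_compose]
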